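-- pv_equiv track=rewrite | github.com/va009039/dasv7m | daslib.py | SignExtend
-- ===== SOURCE A (Python) =====
-- def SignExtend(value_list):
--     imm32 = 0
--     total_size = 0
--     for value,size in value_list:
--         imm32 <<= size
--         imm32 |= value
--         total_size += size
--     msb_mask = 1<<(total_size-1)
--     if imm32 & msb_mask:
--         imm32 -= (1<<total_size)
--     return imm32
-- ===== SOURCE B (Python) =====
-- def _combine(vl):
--     n = len(vl)
--     if n == 0:
--         return (0, 0)
--     if n == 1:
--         v, s = vl[0]
--         return (v, s)
--     mid = n // 2
--     li, ls = _combine(vl[:mid])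
--     ri, rs = _combine(vl[mid:])
--     return ((li << rs) | ri, ls + rs)
--
-- def SignExtend(value_list):
--     imm32, total_size = _combine(value_list)
--     msb_mask = 1 << (total_size - 1)
--     if imm32 & msb_mask:
--         imm32 -= (1 << total_size)
--     return imm32
-- ===== Notes on version B (the rewrite author's own statement) =====
-- stated objective: alternative
-- what changed: B replaces A's single left-to-right shift-accumulate loop with a divide-and-conquer recursion: the list is split in half, each half is combined into a (bits,width) pair, and the pair results are merged with one shift-and-OR; the sign-extension tail is unchanged.
import Mathlib
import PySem

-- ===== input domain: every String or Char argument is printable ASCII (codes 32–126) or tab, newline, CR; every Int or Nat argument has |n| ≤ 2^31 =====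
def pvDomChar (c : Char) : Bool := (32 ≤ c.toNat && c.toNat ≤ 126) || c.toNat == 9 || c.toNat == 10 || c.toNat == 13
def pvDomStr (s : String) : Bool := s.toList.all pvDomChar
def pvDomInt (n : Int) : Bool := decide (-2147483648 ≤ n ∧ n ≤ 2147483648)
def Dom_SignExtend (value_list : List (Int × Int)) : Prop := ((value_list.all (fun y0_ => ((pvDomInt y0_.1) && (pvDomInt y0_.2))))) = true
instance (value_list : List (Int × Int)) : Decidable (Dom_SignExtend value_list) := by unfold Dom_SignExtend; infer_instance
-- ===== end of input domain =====

-- B combines the fields by divide-and-conquer (split the list in half, merge (bits,width) pairs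
-- with one shift-and-OR) instead of A's left-to-right shift-accumulate loop; same sign tail.

-- ===== PORT A =====
-- Python's `x << k` on ints is Lean's `x <<< k` for k ≥ 0 (Pre_ guarantees all sizes ≥ 0 and
-- total_size ≥ 1, exactly where Python does not raise ValueError); `|`/`&` are PySem.Int.bor/band.
def SignExtend (value_list : List (Int × Int)) : Int :=
  let st := value_list.foldl
    (fun (p : Int × Int) (vs : Int × Int) =>
      (PySem.Int.bor (p.1 <<< vs.2.toNat) vs.1, p.2 + vs.2)) (0, 0)
  let imm32 := st.1
  let total_size := st.2
  let msb_mask : Int := 1 <<< (total_size - 1).toNat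
  if PySem.Int.band imm32 msb_mask ≠ 0 then imm32 - (1 <<< total_size.toNat) else imm32

-- ===== PORT B =====
-- _combine of Source B: split at len//2, recurse on the two slices, merge with (li << rs) | ri.
def pvCombine : List (Int × Int) → Int × Int
  | [] => (0, 0)
  | [p] => (p.1, p.2)
  | p :: q :: rest =>
    let vl := p :: q :: rest
    let mid := vl.length / 2
    let l := pvCombine (vl.take mid)
    let r := pvCombine (vl.drop mid)
    (PySem.Int.bor (l.1 <<< r.2.toNat) r.1, l.2 + r.2)
termination_by vl => vl.length
decreasing_by
  · simp; omega
  · simp; omega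

def SignExtend_alt (value_list : List (Int × Int)) : Int :=
  let st := pvCombine value_list
  let imm32 := st.1
  let total_size := st.2
  let msb_mask : Int := 1 <<< (total_size - 1).toNat
  if PySem.Int.band imm32 msb_mask ≠ 0 then imm32 - (1 <<< total_size.toNat) else imm32

-- ===== PRECONDITION & SPEC =====
-- Exactly where Python A returns: a negative size makes `imm32 <<= size` raise ValueError, and a
-- total size of 0 (in particular the empty list) makes `1 << (total_size-1)` raise ValueError.
def Pre_SignExtend (value_list : List (Int × Int)) : Prop :=
  (∀ p ∈ value_list, 0 ≤ p.2) ∧ 1 ≤ (value_list.map Prod.snd).sum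
instance (value_list : List (Int × Int)) : Decidable (Pre_SignExtend value_list) := by
  unfold Pre_SignExtend; infer_instance
def pvWitness_SignExtend : (List (Int × Int)) := [(-3, 4), (5, 3)]

def Spec_SignExtend (value_list : List (Int × Int)) (out : Int) : Prop := out = SignExtend_alt value_list
instance (value_list : List (Int × Int)) (out : Int) : Decidable (Spec_SignExtend value_list out) := by unfold Spec_SignExtend; infer_instance

-- ===== CLAIM (what is proved, stated in full; the proofs are below) =====
def Claim_equal_SignExtend : Prop := ∀ (value_list : List (Int × Int)), Dom_SignExtend value_list → Pre_SignExtend value_list → Spec_SignExtend value_list (SignExtend value_list)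

-- ===== LEMMAS AND PROOFS =====

theorem nat_ldiff_add_and (n : Nat) : ∀ m : Nat, n.ldiff m + (n &&& m) = n := by
  induction n using Nat.binaryRec with
  | zero =>
    intro m
    have h0 : Nat.ldiff 0 m = 0 := Nat.eq_of_testBit_eq (fun i => by
      simp [Nat.testBit_ldiff])
    simp [h0]
  | bit b n ih =>
    intro m
    have hm : m = Nat.bit (m.testBit 0) (m >>> 1) := (Nat.bit_testBit_zero_shiftRight_one m).symm
    rw [hm, Nat.ldiff_bit, Nat.land_bit, Nat.bit_val, Nat.bit_val, Nat.bit_val]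
    have := ih (m >>> 1)
    cases b <;> cases m.testBit 0 <;> simp [Bool.toNat] <;> omega

theorem bor_eq_lor (a b : Int) : PySem.Int.bor a b = Int.lor a b := by
  cases a with
  | ofNat m =>
    cases b with
    | ofNat k =>
      simp [PySem.Int.bor, Int.lor]
    | negSucc k =>
      have h1 : ¬ (0 : Int) ≤ Int.negSucc k := by omega
      have h2 : (-(Int.negSucc k) - 1).toNat = k := by
        rw [Int.negSucc_eq]; omega
      have h3 : k - (k &&& m) = k.ldiff m := by
        have := nat_ldiff_add_and k m
        omega
      simp only [PySem.Int.bor, h1, if_false, h2, Int.lor]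
      have h0 : (0 : Int) ≤ Int.ofNat m := Int.natCast_nonneg m
      simp only [h0, if_true]
      rw [show (Int.ofNat m).toNat = m from rfl, h3, Int.negSucc_eq]
      ring
  | negSucc m =>
    have h1 : ¬ (0 : Int) ≤ Int.negSucc m := by omega
    have h2 : (-(Int.negSucc m) - 1).toNat = m := by
      rw [Int.negSucc_eq]; omega
    cases b with
    | ofNat k =>
      have h3 : m - (m &&& k) = m.ldiff k := by
        have := nat_ldiff_add_and m k
        omega
      have h0 : (0 : Int) ≤ Int.ofNat k := Int.natCast_nonneg k
      simp only [PySem.Int.bor, h1, if_false, h2, h0, if_true, Int.lor]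
      rw [show (Int.ofNat k).toNat = k from rfl, h3, Int.negSucc_eq]
      ring
    | negSucc k =>
      have h1' : ¬ (0 : Int) ≤ Int.negSucc k := by omega
      have h2' : (-(Int.negSucc k) - 1).toNat = k := by
        rw [Int.negSucc_eq]; omega
      simp only [PySem.Int.bor, h1, h1', if_false, h2, h2', Int.lor]
      rw [Int.negSucc_eq]
      ring

theorem testBit_bor (a b : Int) (i : Nat) :
    (PySem.Int.bor a b).testBit i = (a.testBit i || b.testBit i) := by
  rw [bor_eq_lor, Int.testBit_lor]

theorem testBit_shl (a : Int) (n i : Nat) :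
    (a <<< n).testBit i = (decide (n ≤ i) && a.testBit (i - n)) := by
  cases a with
  | ofNat m =>
    show ((Int.ofNat m).shiftLeft n).testBit i = _
    rw [Int.shiftLeft.eq_1, Int.testBit.eq_1, Nat.testBit_shiftLeft, Int.testBit.eq_1]
  | negSucc m =>
    show ((Int.negSucc m).shiftLeft n).testBit i = _
    rw [Int.shiftLeft.eq_2, Int.testBit.eq_2, Int.testBit.eq_2]
    have hpow : 1 ≤ 2 ^ n := Nat.one_le_two_pow
    have hrw : (m + 1) <<< n - 1 = 2 ^ n * m + (2 ^ n - 1) := by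
      rw [Nat.shiftLeft_eq]; ring_nf; omega
    rw [hrw, Nat.testBit_two_pow_mul_add m (by omega) i, Nat.testBit_two_pow_sub_one]
    by_cases h : i < n
    · have h' : ¬ (n ≤ i) := by omega
      simp [h, h']
    · have h' : n ≤ i := by omega
      simp [h, h']

theorem int_testBit_ext (a b : Int) (h : ∀ i, a.testBit i = b.testBit i) : a = b := by
  cases a with
  | ofNat m =>
    cases b with
    | ofNat k =>
      have : m = k := Nat.eq_of_testBit_eq (fun i => by
        have := h i; rwa [Int.testBit.eq_1, Int.testBit.eq_1] at this)
      simp [this]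
    | negSucc k =>
      exfalso
      have hi := h (m + k)
      rw [Int.testBit.eq_1, Int.testBit.eq_2] at hi
      have hm : m.testBit (m + k) = false :=
        Nat.testBit_eq_false_of_lt (lt_of_lt_of_le (Nat.lt_two_pow_self) (Nat.pow_le_pow_right (by omega) (by omega)))
      have hk : k.testBit (m + k) = false :=
        Nat.testBit_eq_false_of_lt (lt_of_lt_of_le (Nat.lt_two_pow_self) (Nat.pow_le_pow_right (by omega) (by omega)))
      rw [hm, hk] at hi
      simp at hi
  | negSucc m =>
    cases b with
    | ofNat k =>
      exfalso
      have hi := h (m + k)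
      rw [Int.testBit.eq_2, Int.testBit.eq_1] at hi
      have hm : m.testBit (m + k) = false :=
        Nat.testBit_eq_false_of_lt (lt_of_lt_of_le (Nat.lt_two_pow_self) (Nat.pow_le_pow_right (by omega) (by omega)))
      have hk : k.testBit (m + k) = false :=
        Nat.testBit_eq_false_of_lt (lt_of_lt_of_le (Nat.lt_two_pow_self) (Nat.pow_le_pow_right (by omega) (by omega)))
      rw [hm, hk] at hi
      simp at hi
    | negSucc k =>
      have : m = k := Nat.eq_of_testBit_eq (fun i => by
        have := h i; rw [Int.testBit.eq_2, Int.testBit.eq_2] at this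
        exact Bool.not_inj this)
      simp [this]

theorem bor_shl (a b : Int) (n : Nat) :
    (PySem.Int.bor a b) <<< n = PySem.Int.bor (a <<< n) (b <<< n) := by
  apply int_testBit_ext
  intro i
  simp [testBit_bor, testBit_shl, Bool.and_or_distrib_left]

theorem shl_shl (a : Int) (m n : Nat) : (a <<< m) <<< n = a <<< (m + n) := by
  apply int_testBit_ext
  intro i
  simp only [testBit_shl]
  by_cases h1 : n ≤ i
  · by_cases h2 : m ≤ i - n
    · have h3 : m + n ≤ i := by omega
      simp only [h1, h2, h3, decide_true, Bool.true_and]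
      congr 1
      omega
    · have h3 : ¬ (m + n ≤ i) := by omega
      simp [h1, h2, h3]
  · have h3 : ¬ (m + n ≤ i) := by omega
    simp [h1, h3]

theorem zero_shl (n : Nat) : (0 : Int) <<< n = 0 := by
  rw [Int.shiftLeft_eq]; ring

-- A's loop body and the total bit width
def pvStepA : Int × Int → Int × Int → Int × Int :=
  fun p vs => (PySem.Int.bor (p.1 <<< vs.2.toNat) vs.1, p.2 + vs.2)
def pvSum (l : List (Int × Int)) : Int := (l.map Prod.snd).sum

theorem pvSum_nonneg (l : List (Int × Int)) (hs : ∀ p ∈ l, 0 ≤ p.2) : 0 ≤ pvSum l := by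
  induction l with
  | nil => simp [pvSum]
  | cons x xs ih =>
    have h1 := hs x (by simp)
    have h2 := ih (fun p hp => hs p (by simp [hp]))
    simp only [pvSum, List.map_cons, List.sum_cons] at *
    omega

theorem foldA_snd (l : List (Int × Int)) : ∀ a t : Int, (l.foldl pvStepA (a, t)).2 = t + pvSum l := by
  induction l with
  | nil => intro a t; simp [pvSum]
  | cons x xs ih =>
    intro a t
    simp only [List.foldl_cons, pvStepA, pvSum, List.map_cons, List.sum_cons]
    rw [ih]
    simp only [pvSum]
    ring

theorem foldA_fst (l : List (Int × Int)) (hs : ∀ p ∈ l, 0 ≤ p.2) :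
    ∀ a t : Int, (l.foldl pvStepA (a, t)).1 =
      PySem.Int.bor (a <<< (pvSum l).toNat) ((l.foldl pvStepA (0, 0)).1) := by
  induction l with
  | nil =>
    intro a t
    simp [pvSum, PySem.Int.bor_zero]
  | cons x xs ih =>
    intro a t
    have hx : 0 ≤ x.2 := hs x (by simp)
    have hxs : ∀ p ∈ xs, 0 ≤ p.2 := fun p hp => hs p (by simp [hp])
    have hsum : 0 ≤ pvSum xs := pvSum_nonneg xs hxs
    have htn : x.2.toNat + (pvSum xs).toNat = (pvSum (x :: xs)).toNat := by
      simp only [pvSum, List.map_cons, List.sum_cons] at *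
      omega
    simp only [List.foldl_cons]
    rw [show pvStepA (a, t) x = (PySem.Int.bor (a <<< x.2.toNat) x.1, t + x.2) from rfl,
        show pvStepA (0, 0) x = (PySem.Int.bor ((0:Int) <<< x.2.toNat) x.1, 0 + x.2) from rfl]
    rw [ih hxs (PySem.Int.bor (a <<< x.2.toNat) x.1) (t + x.2),
        ih hxs (PySem.Int.bor ((0:Int) <<< x.2.toNat) x.1) (0 + x.2)]
    rw [zero_shl, PySem.Int.bor_comm 0 x.1, PySem.Int.bor_zero]
    rw [bor_shl, shl_shl, htn, bor_assoc']
where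
  bor_assoc' := fun a b c => (by
    apply int_testBit_ext
    intro i
    simp [testBit_bor, Bool.or_assoc] : PySem.Int.bor (PySem.Int.bor a b) c = PySem.Int.bor a (PySem.Int.bor b c))

-- A's fold over a concatenation splits into the two halves' folds merged by one shift-and-OR —
-- exactly pvCombine's merge step.
theorem foldA_append (l1 l2 : List (Int × Int)) (hs2 : ∀ p ∈ l2, 0 ≤ p.2) :
    (l1 ++ l2).foldl pvStepA (0, 0) =
      (PySem.Int.bor (((l1.foldl pvStepA (0, 0)).1) <<< (pvSum l2).toNat)
        ((l2.foldl pvStepA (0, 0)).1), pvSum l1 + pvSum l2) := by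
  rw [List.foldl_append]
  have h1 : l1.foldl pvStepA (0, 0) = ((l1.foldl pvStepA (0, 0)).1, pvSum l1) := by
    rw [Prod.ext_iff]
    exact ⟨rfl, by rw [foldA_snd l1 0 0]; ring⟩
  rw [h1]
  rw [Prod.ext_iff]
  constructor
  · exact foldA_fst l2 hs2 _ _
  · rw [foldA_snd l2]

theorem combine_spec (n : Nat) : ∀ l : List (Int × Int), l.length ≤ n → (∀ p ∈ l, 0 ≤ p.2) →
    pvCombine l = ((l.foldl pvStepA (0, 0)).1, pvSum l) := by
  induction n with
  | zero =>
    intro l hn _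
    have : l = [] := List.eq_nil_of_length_eq_zero (by omega)
    subst this
    simp [pvCombine, pvSum]
  | succ n ih =>
    intro l hn hs
    match l with
    | [] => simp [pvCombine, pvSum]
    | [p] =>
      simp only [pvCombine, List.foldl_cons, List.foldl_nil, pvStepA, pvSum, List.map_cons,
        List.map_nil, List.sum_cons, List.sum_nil]
      rw [zero_shl, PySem.Int.bor_comm 0 p.1, PySem.Int.bor_zero]
      simp
    | p :: q :: rest =>
      rw [pvCombine]
      have hlen : (p :: q :: rest).length = rest.length + 2 := by simp
      set vl := p :: q :: rest with hvl
      set mid := vl.length / 2 with hmid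
      have hm1 : 1 ≤ mid := by rw [hmid, hlen]; omega
      have hm2 : mid < vl.length := by rw [hmid]; omega
      have hta : (vl.take mid).length ≤ n := by
        rw [List.length_take]
        have := hn
        rw [hvl] at *
        omega
      have hda : (vl.drop mid).length ≤ n := by
        rw [List.length_drop]
        have := hn
        rw [hvl] at *
        omega
      have hst : ∀ p' ∈ vl.take mid, 0 ≤ p'.2 := fun p' hp' => hs p' (List.mem_of_mem_take hp')
      have hsd : ∀ p' ∈ vl.drop mid, 0 ≤ p'.2 := fun p' hp' => hs p' (List.mem_of_mem_drop hp')
      rw [ih (vl.take mid) hta hst, ih (vl.drop mid) hda hsd]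
      have happ : vl.take mid ++ vl.drop mid = vl := List.take_append_drop mid vl
      have := foldA_append (vl.take mid) (vl.drop mid) hsd
      rw [happ] at this
      rw [this]
      simp only []
      rw [Prod.ext_iff]
      refine ⟨rfl, ?_⟩
      show pvSum (vl.take mid) + pvSum (vl.drop mid) = pvSum vl
      rw [← happ]
      simp [pvSum]

-- ===== VERDICT (by name: the statement is the Claim_ definition above) =====
theorem SignExtend_spec : Claim_equal_SignExtend := by
  intro l _ hpre
  show SignExtend l = SignExtend_alt l
  simp only [SignExtend, SignExtend_alt]
  rw [show (fun (p : Int × Int) (vs : Int × Int) =>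
      (PySem.Int.bor (p.1 <<< vs.2.toNat) vs.1, p.2 + vs.2)) = pvStepA from rfl]
  rw [combine_spec l.length l le_rfl hpre.1]
  have hsnd : (l.foldl pvStepA (0, 0)).2 = pvSum l := by rw [foldA_snd l 0 0]; ring
  rw [hsnd]
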